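-- pv_equiv track=rewrite | github.com/jdeepankur/java-study | travelfusionmock/analysis/solver.py | _satisfies_int_constraints
-- ===== SOURCE A (Python) =====
-- def _satisfies_int_constraints(v: int, constraints: list[tuple[str, int]]) -> bool:
--     for op, n in constraints:
--         if op == "==" and not (v == n):
--             return False
--         if op == "!=" and not (v != n):
--             return False
--         if op == "<" and not (v < n):
--             return False
--         if op == "<=" and not (v <= n):
--             return False
--         if op == ">" and not (v > n):
--             return False
--         if op == ">=" and not (v >= n):
--             return False
--     return True
-- ===== SOURCE B (Python) =====
-- def _satisfies_int_constraints(v: int, constraints: list[tuple[str, int]]) -> bool: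
--     # Stage 1: fold all constraints into a summary (no check against v yet):
--     # a lower bound, an upper bound, required values and forbidden values.
--     lo = None   # v must be >= lo
--     hi = None   # v must be <= hi
--     eqs = []    # v must equal each of these
--     nes = []    # v must differ from each of these
--     for op, n in constraints:
--         if op == "==":
--             eqs.append(n)
--         elif op == "!=":
--             nes.append(n)
--         elif op == "<":
--             hi = n - 1 if hi is None else min(hi, n - 1)
--         elif op == "<=":
--             hi = n if hi is None else min(hi, n)
--         elif op == ">":
--             lo = n + 1 if lo is None else max(lo, n + 1)
--         elif op == ">=":
--             lo = n if lo is None else max(lo, n)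
--         # unrecognised operators impose nothing, as in the original
--     # Stage 2: one check of v against the summary.
--     return (all(v == n for n in eqs)
--             and all(v != n for n in nes)
--             and (lo is None or lo <= v)
--             and (hi is None or v <= hi))
-- ===== Notes on version B (the rewrite author's own statement) =====
-- stated objective: alternative
-- what changed: Instead of testing v against each constraint in one short-circuiting pass, B first folds all constraints into an aggregate summary (tightest lower/upper bound plus required and forbidden values) without looking at v, then checks v once against that summary.
import Mathlib
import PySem

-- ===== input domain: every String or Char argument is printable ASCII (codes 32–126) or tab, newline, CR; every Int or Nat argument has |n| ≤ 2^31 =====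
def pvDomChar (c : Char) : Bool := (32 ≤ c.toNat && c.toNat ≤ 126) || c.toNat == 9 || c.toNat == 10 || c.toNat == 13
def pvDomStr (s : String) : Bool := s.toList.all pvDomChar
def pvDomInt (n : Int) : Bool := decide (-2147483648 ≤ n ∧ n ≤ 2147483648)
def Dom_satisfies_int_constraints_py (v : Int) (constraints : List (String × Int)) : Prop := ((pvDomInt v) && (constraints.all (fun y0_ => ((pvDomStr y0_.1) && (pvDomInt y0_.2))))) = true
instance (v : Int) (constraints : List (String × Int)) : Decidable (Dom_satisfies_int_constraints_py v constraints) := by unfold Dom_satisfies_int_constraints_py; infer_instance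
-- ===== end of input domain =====

-- B replaces A's single short-circuiting per-constraint check with two stages: fold the
-- constraints into an aggregate summary (bounds, required and forbidden values), then
-- check v once against the summary; alternative decomposition, same cost.

-- ===== PORT A =====
-- literal port of A: loop over the constraints, early `return False` on each failing branch
def satisfies_int_constraints_py (v : Int) (constraints : List (String × Int)) : Bool :=
  match constraints with
  | [] => true
  | (op, n) :: rest =>
    if op == "==" && !(v == n) then false
    else if op == "!=" && !(v != n) then false
    else if op == "<" && !(decide (v < n)) then false
    else if op == "<=" && !(decide (v ≤ n)) then false
    else if op == ">" && !(decide (v > n)) then false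
    else if op == ">=" && !(decide (v ≥ n)) then false
    else satisfies_int_constraints_py v rest

-- ===== PORT B =====
-- the summary state (lo, hi, eqs, nes) of Source B
-- one iteration of Source B's stage-1 loop
def bStep (st : Option Int × Option Int × List Int × List Int) (p : String × Int) :
    Option Int × Option Int × List Int × List Int :=
  let (lo, hi, eqs, nes) := st
  let (op, n) := p
  if op == "==" then (lo, hi, eqs ++ [n], nes)
  else if op == "!=" then (lo, hi, eqs, nes ++ [n])
  else if op == "<" then (lo, (match hi with | none => some (n - 1) | some h => some (min h (n - 1))), eqs, nes)
  else if op == "<=" then (lo, (match hi with | none => some n | some h => some (min h n)), eqs, nes)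
  else if op == ">" then ((match lo with | none => some (n + 1) | some l => some (max l (n + 1))), hi, eqs, nes)
  else if op == ">=" then ((match lo with | none => some n | some l => some (max l n)), hi, eqs, nes)
  else (lo, hi, eqs, nes)

-- Source B's stage-2 final check of v against the summary
def bCheck (v : Int) (st : Option Int × Option Int × List Int × List Int) : Bool :=
  let (lo, hi, eqs, nes) := st
  eqs.all (fun n => v == n) &&
  nes.all (fun n => v != n) &&
  (match lo with | none => true | some l => decide (l ≤ v)) &&
  (match hi with | none => true | some h => decide (v ≤ h))

def satisfies_int_constraints_py_alt (v : Int) (constraints : List (String × Int)) : Bool :=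
  bCheck v (constraints.foldl bStep (none, none, [], []))

-- ===== PRECONDITION & SPEC =====
def Spec_satisfies_int_constraints_py (v : Int) (constraints : List (String × Int)) (out : Bool) : Prop := out = satisfies_int_constraints_py_alt v constraints
instance (v : Int) (constraints : List (String × Int)) (out : Bool) : Decidable (Spec_satisfies_int_constraints_py v constraints out) := by unfold Spec_satisfies_int_constraints_py; infer_instance

-- ===== CLAIM (what is proved, stated in full; the proofs are below) =====
def Claim_equal_satisfies_int_constraints_py : Prop := ∀ (v : Int) (constraints : List (String × Int)), Dom_satisfies_int_constraints_py v constraints → Spec_satisfies_int_constraints_py v constraints (satisfies_int_constraints_py v constraints)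

-- ===== LEMMAS AND PROOFS =====

-- the truth value of a single constraint (unknown operators hold vacuously)
def satOne (v : Int) (op : String) (n : Int) : Bool :=
  if op == "==" then v == n
  else if op == "!=" then v != n
  else if op == "<" then decide (v < n)
  else if op == "<=" then decide (v ≤ n)
  else if op == ">" then decide (v > n)
  else if op == ">=" then decide (v ≥ n)
  else true

-- A's cascade on one constraint equals satOne && continuation
theorem a_step (v n : Int) (op : String) (c : Bool) :
    (if op == "==" && !(v == n) then false
     else if op == "!=" && !(v != n) then false
     else if op == "<" && !(decide (v < n)) then false
     else if op == "<=" && !(decide (v ≤ n)) then false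
     else if op == ">" && !(decide (v > n)) then false
     else if op == ">=" && !(decide (v ≥ n)) then false
     else c) = (satOne v op n && c) := by
  unfold satOne
  by_cases e1 : op = "=="
  · subst e1; by_cases h : v = n <;> simp [h]
  · by_cases e2 : op = "!="
    · subst e2; by_cases h : v = n <;> simp [h]
    · by_cases e3 : op = "<"
      · subst e3; by_cases h : v < n <;> simp [h]
      · by_cases e4 : op = "<="
        · subst e4; by_cases h : v ≤ n <;> simp [h]
        · by_cases e5 : op = ">"
          · subst e5; by_cases h : n < v <;> simp [h]
          · by_cases e6 : op = ">="
            · subst e6; by_cases h : n ≤ v <;> simp [h]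
            · simp [e1, e2, e3, e4, e5, e6]

theorem a_all (v : Int) (cs : List (String × Int)) :
    satisfies_int_constraints_py v cs = cs.all (fun p => satOne v p.1 p.2) := by
  induction cs with
  | nil => rfl
  | cons p rest ih =>
    obtain ⟨op, n⟩ := p
    simp only [satisfies_int_constraints_py, List.all_cons]
    rw [a_step, ih]

-- B's one folding step commutes with the final check: absorbing a constraint into the
-- summary multiplies the check by that constraint's truth value
theorem b_step (v n : Int) (op : String) (st : Option Int × Option Int × List Int × List Int) :
    bCheck v (bStep st (op, n)) = (bCheck v st && satOne v op n) := by
  obtain ⟨lo, hi, eqs, nes⟩ := st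
  unfold bStep bCheck satOne
  by_cases e1 : op = "=="
  · subst e1; simp; ac_rfl
  · by_cases e2 : op = "!="
    · subst e2; simp; ac_rfl
    · by_cases e3 : op = "<"
      · subst e3
        cases lo <;> cases hi <;>
          cases hE : eqs.all (fun m => v == m) <;> cases hN : nes.all (fun m => v != m) <;>
          simp [hE, hN] <;> (rw [Bool.eq_iff_iff]; simp; omega)
      · by_cases e4 : op = "<="
        · subst e4
          cases lo <;> cases hi <;>
            cases hE : eqs.all (fun m => v == m) <;> cases hN : nes.all (fun m => v != m) <;>
            simp [hE, hN] <;> (rw [Bool.eq_iff_iff]; simp; omega)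
        · by_cases e5 : op = ">"
          · subst e5
            cases lo <;> cases hi <;>
              cases hE : eqs.all (fun m => v == m) <;> cases hN : nes.all (fun m => v != m) <;>
              simp [hE, hN] <;> (rw [Bool.eq_iff_iff]; simp; omega)
          · by_cases e6 : op = ">="
            · subst e6
              cases lo <;> cases hi <;>
                cases hE : eqs.all (fun m => v == m) <;> cases hN : nes.all (fun m => v != m) <;>
                simp [hE, hN] <;> (rw [Bool.eq_iff_iff]; simp; omega)
            · simp [e1, e2, e3, e4, e5, e6]

theorem b_all (v : Int) (cs : List (String × Int))
    (st : Option Int × Option Int × List Int × List Int) :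
    bCheck v (cs.foldl bStep st) = (bCheck v st && cs.all (fun p => satOne v p.1 p.2)) := by
  induction cs generalizing st with
  | nil => simp
  | cons p rest ih =>
    obtain ⟨op, n⟩ := p
    simp only [List.foldl_cons, List.all_cons]
    rw [ih, b_step, Bool.and_assoc]

-- ===== VERDICT (by name: the statement is the Claim_ definition above) =====
theorem satisfies_int_constraints_py_spec : Claim_equal_satisfies_int_constraints_py := by
  intro v cs _
  unfold Spec_satisfies_int_constraints_py satisfies_int_constraints_py_alt
  rw [a_all, b_all]
  rfl
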